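-- pv_equiv track=rewrite | github.com/Manavpatel1823/SchemaPilot | db_rag/chart_suggest.py | _looks_like_datetime_name
-- ===== SOURCE A (Python) =====
-- def _looks_like_datetime_name(col_name: str) -> bool:
--     name = col_name.lower()
--     keywords = [
--         "date",
--         "time",
--         "month",
--         "year",
--         "day",
--         "created_at",
--         "updated_at",
--         "enrolled_at",
--     ]
--     return any(k in name for k in keywords)
-- ===== SOURCE B (Python) =====
-- def _looks_like_datetime_name(col_name: str) -> bool:
--     # Single left-to-right scan over positions: at each index, test whether
--     # some keyword starts there (instead of eight separate substring searches).
--     name = col_name.lower()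
--     keywords = (
--         "date",
--         "time",
--         "month",
--         "year",
--         "day",
--         "created_at",
--         "updated_at",
--         "enrolled_at",
--     )
--     for i in range(len(name)):
--         for k in keywords:
--             if name.startswith(k, i):
--                 return True
--     return False
-- ===== Notes on version B (the rewrite author's own statement) =====
-- stated objective: alternative
-- what changed: B scans the lowercased name position by position, testing at each index whether any keyword starts there and returning early, instead of A's any() over eight independent substring searches.
import Mathlib
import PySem

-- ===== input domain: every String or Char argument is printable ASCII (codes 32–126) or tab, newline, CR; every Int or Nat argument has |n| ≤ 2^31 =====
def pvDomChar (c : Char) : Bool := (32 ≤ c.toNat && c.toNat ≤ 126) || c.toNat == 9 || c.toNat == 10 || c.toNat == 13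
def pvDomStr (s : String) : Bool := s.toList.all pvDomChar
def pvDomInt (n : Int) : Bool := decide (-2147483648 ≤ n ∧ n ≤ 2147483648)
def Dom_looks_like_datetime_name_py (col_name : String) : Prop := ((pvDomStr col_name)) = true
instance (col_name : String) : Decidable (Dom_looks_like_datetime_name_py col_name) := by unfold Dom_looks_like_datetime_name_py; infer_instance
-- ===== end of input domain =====

-- B replaces A's any() over eight substring searches by one position-by-position
-- scan with an early return at the first matching keyword (objective: alternative).

-- ===== PORT A =====
def looks_like_datetime_name_py (col_name : String) : Bool :=
  let name := PySem.Str.lower col_name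
  let keywords : List String :=
    ["date", "time", "month", "year", "day", "created_at", "updated_at", "enrolled_at"]
  keywords.any (fun k => PySem.Str.isIn k name)

-- ===== PORT B =====
-- B's keyword tuple, as char lists (B works on the lowercased text directly)
def pvAltKeywords : List (List Char) :=
  ["date".toList, "time".toList, "month".toList, "year".toList, "day".toList,
   "created_at".toList, "updated_at".toList, "enrolled_at".toList]

-- B's loop "for i in range(len(name)): for k in keywords: if name.startswith(k, i)":
-- structural recursion over the suffixes of the name, early-out via ||
def pvAltScan : List Char → Bool
  | [] => false
  | c :: rest =>
    (pvAltKeywords.any (fun k => PySem.Chars.startswith (c :: rest) k)) || pvAltScan rest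

def looks_like_datetime_name_py_alt (col_name : String) : Bool :=
  pvAltScan (PySem.Chars.lower col_name.toList)

-- ===== PRECONDITION & SPEC =====
def Spec_looks_like_datetime_name_py (col_name : String) (out : Bool) : Prop := out = looks_like_datetime_name_py_alt col_name
instance (col_name : String) (out : Bool) : Decidable (Spec_looks_like_datetime_name_py col_name out) := by unfold Spec_looks_like_datetime_name_py; infer_instance

-- ===== CLAIM (what is proved, stated in full; the proofs are below) =====
def Claim_equal_looks_like_datetime_name_py : Prop := ∀ (col_name : String), Dom_looks_like_datetime_name_py col_name → Spec_looks_like_datetime_name_py col_name (looks_like_datetime_name_py col_name)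

-- ===== LEMMAS AND PROOFS =====

lemma pvAltKeywords_ne_nil : ∀ k ∈ pvAltKeywords, k ≠ [] := by decide

-- the scan finds a match iff some keyword is a prefix of some suffix
lemma pvAltScan_iff (l : List Char) :
    pvAltScan l = true ↔ ∃ k ∈ pvAltKeywords, ∃ j, k <+: l.drop j := by
  induction l with
  | nil =>
    simp only [pvAltScan, List.drop_nil]
    constructor
    · intro h; exact absurd h (by decide)
    · rintro ⟨k, hk, _, hpre⟩
      exact absurd (List.prefix_nil.mp hpre) (pvAltKeywords_ne_nil k hk)
  | cons c rest ih =>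
    simp only [pvAltScan, Bool.or_eq_true, List.any_eq_true, ih]
    constructor
    · rintro (⟨k, hk, hsw⟩ | ⟨k, hk, j, hpre⟩)
      · exact ⟨k, hk, 0, by simpa using (PySem.Chars.startswith_iff _ _).mp hsw⟩
      · exact ⟨k, hk, j + 1, by simpa using hpre⟩
    · rintro ⟨k, hk, j, hpre⟩
      cases j with
      | zero => exact Or.inl ⟨k, hk, (PySem.Chars.startswith_iff _ _).mpr (by simpa using hpre)⟩
      | succ j => exact Or.inr ⟨k, hk, j, by simpa using hpre⟩

lemma pvA_iff (col_name : String) :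
    looks_like_datetime_name_py col_name = true ↔
      ∃ k ∈ pvAltKeywords, k <:+: PySem.Chars.lower col_name.toList := by
  simp only [looks_like_datetime_name_py, List.any_eq_true, PySem.Str.isIn_iff_infix,
    PySem.Str.toList_lower, pvAltKeywords]
  constructor
  · rintro ⟨k, hk, hinf⟩
    refine ⟨k.toList, ?_, hinf⟩
    fin_cases hk <;> simp
  · rintro ⟨k, hk, hinf⟩
    fin_cases hk <;> exact ⟨_, by simp, hinf⟩

-- ===== VERDICT (by name: the statement is the Claim_ definition above) =====
theorem looks_like_datetime_name_py_spec : Claim_equal_looks_like_datetime_name_py := by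
  intro col_name _
  unfold Spec_looks_like_datetime_name_py
  rw [Bool.eq_iff_iff, pvA_iff, looks_like_datetime_name_py_alt, pvAltScan_iff]
  constructor
  · rintro ⟨k, hk, hinf⟩
    rcases (PySem.Chars.exists_prefix_drop_iff_isIn k _).mpr
      ((PySem.Chars.isIn_iff_infix k _).mpr hinf) with ⟨j, hj⟩
    exact ⟨k, hk, j, hj⟩
  · rintro ⟨k, hk, j, hj⟩
    exact ⟨k, hk, (PySem.Chars.isIn_iff_infix k _).mp
      ((PySem.Chars.exists_prefix_drop_iff_isIn k _).mp ⟨j, hj⟩)⟩
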